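-- pv_equiv track=rewrite | github.com/bryfeng/sherpa | app/services/address.py | is_valid_sui_address
-- ===== SOURCE A (Python) =====
-- _HEX_ALPHABET = set("0123456789abcdefABCDEF")
--
-- def is_valid_sui_address(address: str) -> bool:
--     if not address.startswith("0x"):
--         return False
--     hex_part = address[2:]
--     if not hex_part or len(hex_part) > 64:
--         return False
--     if len(hex_part) % 2 != 0:
--         return False
--     return all(ch in _HEX_ALPHABET for ch in hex_part)
-- ===== SOURCE B (Python) =====
-- def _is_hex_digit(c):
--     return '0' <= c <= '9' or 'a' <= c <= 'f' or 'A' <= c <= 'F'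
--
--
-- def _consume_pairs(s, i, pairs):
--     # consume hex-digit pairs from position i to the end of s
--     if i == len(s):
--         return 1 <= pairs <= 32
--     if i + 1 >= len(s):
--         return False
--     if not (_is_hex_digit(s[i]) and _is_hex_digit(s[i + 1])):
--         return False
--     return _consume_pairs(s, i + 2, pairs + 1)
--
--
-- def is_valid_sui_address(address: str) -> bool:
--     if not address.startswith("0x"):
--         return False
--     return _consume_pairs(address, 2, 0)
-- ===== Notes on version B (the rewrite author's own statement) =====
-- stated objective: alternative
-- what changed: Replaces the slice + three separate length checks + set-membership scan by a single recursive pass that consumes hex-digit pairs (range comparisons instead of a set) and counts 1..32 pairs, enforcing non-emptiness, evenness and the 64-char bound at once.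
import Mathlib
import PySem

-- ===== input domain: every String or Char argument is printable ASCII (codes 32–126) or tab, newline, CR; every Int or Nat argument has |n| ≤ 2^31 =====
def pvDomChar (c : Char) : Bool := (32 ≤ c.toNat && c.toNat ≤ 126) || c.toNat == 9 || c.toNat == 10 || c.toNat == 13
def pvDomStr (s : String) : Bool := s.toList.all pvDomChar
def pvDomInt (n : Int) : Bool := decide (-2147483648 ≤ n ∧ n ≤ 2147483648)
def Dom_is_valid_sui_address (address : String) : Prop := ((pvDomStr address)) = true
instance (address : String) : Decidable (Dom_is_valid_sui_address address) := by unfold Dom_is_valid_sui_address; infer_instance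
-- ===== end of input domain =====

-- B replaces A's slice + three length checks + set-membership scan by one recursive
-- pass consuming hex-digit pairs (counted 1..32); same cost, different structure.

-- ===== PORT A =====
def pvHexAlphabet : PySem.Set Char := PySem.Set.ofList "0123456789abcdefABCDEF".toList

def is_valid_sui_address (address : String) : Bool :=
  if !(PySem.Str.startswith address "0x") then false
  else
    let hex_part := PySem.Str.slice address (some 2) none
    if PySem.Str.len hex_part = 0 ∨ PySem.Str.len hex_part > 64 then false
    else if PySem.Str.len hex_part % 2 ≠ 0 then false
    else hex_part.toList.all (fun ch => pvHexAlphabet.contains ch)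

-- ===== PORT B =====
def pvIsHexDigit (c : Char) : Bool :=
  ('0' ≤ c && c ≤ '9') || ('a' ≤ c && c ≤ 'f') || ('A' ≤ c && c ≤ 'F')

-- Source B's _consume_pairs: index recursion over s[i], s[i+1] rendered as structural
-- recursion on the remaining characters (each step consumes the same two chars).
def pvConsumePairs : List Char → Nat → Bool
  | [], pairs => 1 ≤ pairs && pairs ≤ 32
  | [_], _ => false
  | c1 :: c2 :: rest, pairs =>
    if !(pvIsHexDigit c1 && pvIsHexDigit c2) then false
    else pvConsumePairs rest (pairs + 1)

def is_valid_sui_address_alt (address : String) : Bool :=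
  if !(PySem.Str.startswith address "0x") then false
  else pvConsumePairs (address.toList.drop 2) 0

-- ===== PRECONDITION & SPEC =====
def Spec_is_valid_sui_address (address : String) (out : Bool) : Prop := out = is_valid_sui_address_alt address
instance (address : String) (out : Bool) : Decidable (Spec_is_valid_sui_address address out) := by unfold Spec_is_valid_sui_address; infer_instance

-- ===== CLAIM (what is proved, stated in full; the proofs are below) =====
def Claim_equal_is_valid_sui_address : Prop := ∀ (address : String), Dom_is_valid_sui_address address → Spec_is_valid_sui_address address (is_valid_sui_address address)

-- ===== LEMMAS AND PROOFS =====

-- set membership in the hex alphabet = the three range tests of B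
lemma hex_char_eq (c : Char) : pvHexAlphabet.contains c = pvIsHexDigit c := by
  rw [PySem.Set.contains, show pvHexAlphabet = ['0','1','2','3','4','5','6','7','8','9','a','b','c','d','e','f','A','B','C','D','E','F'] from by decide, Bool.eq_iff_iff]
  simp only [List.contains_eq_mem, List.mem_cons, List.not_mem_nil, or_false, decide_eq_true_eq,
    pvIsHexDigit, Bool.or_eq_true, Bool.and_eq_true, Char.ext_iff, Char.le_def,
    UInt32.le_iff_toNat_le, UInt32.ext_iff]
  norm_num
  simp only [show ('0':Char).toNat = 48 by decide, show ('1':Char).toNat = 49 by decide, show ('2':Char).toNat = 50 by decide, show ('3':Char).toNat = 51 by decide, show ('4':Char).toNat = 52 by decide, show ('5':Char).toNat = 53 by decide, show ('6':Char).toNat = 54 by decide, show ('7':Char).toNat = 55 by decide, show ('8':Char).toNat = 56 by decide, show ('9':Char).toNat = 57 by decide, show ('a':Char).toNat = 97 by decide, show ('b':Char).toNat = 98 by decide, show ('c':Char).toNat = 99 by decide, show ('d':Char).toNat = 100 by decide, show ('e':Char).toNat = 101 by decide, show ('f':Char).toNat = 102 by decide, show ('A':Char).toNat = 65 by decide, show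 ('B':Char).toNat = 66 by decide, show ('C':Char).toNat = 67 by decide, show ('D':Char).toNat = 68 by decide, show ('E':Char).toNat = 69 by decide, show ('F':Char).toNat = 70 by decide]
  omega

-- pvConsumePairs characterised by length / evenness / all-hex
lemma consume_eq : ∀ (l : List Char) (k : Nat),
    pvConsumePairs l k =
      (decide (l.length % 2 = 0) && decide (1 ≤ k + l.length / 2) &&
       decide (k + l.length / 2 ≤ 32) && l.all pvIsHexDigit)
  | [], k => by simp [pvConsumePairs]
  | [c], k => by simp [pvConsumePairs]
  | c1 :: c2 :: rest, k => by
    have ih := consume_eq rest (k + 1)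
    have e1 : (rest.length + 1 + 1) % 2 = rest.length % 2 := by omega
    have e2 : (rest.length + 1 + 1) / 2 = rest.length / 2 + 1 := by omega
    simp only [pvConsumePairs, ih, List.all_cons, List.length_cons, e1, e2]
    by_cases h1 : pvIsHexDigit c1 = true <;> by_cases h2 : pvIsHexDigit c2 = true <;>
      simp [h1, h2, Nat.add_assoc, Nat.add_comm]

-- ===== VERDICT (by name: the statement is the Claim_ definition above) =====
theorem is_valid_sui_address_spec : Claim_equal_is_valid_sui_address := by
  intro address _
  unfold Spec_is_valid_sui_address is_valid_sui_address is_valid_sui_address_alt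
  cases PySem.Str.startswith address "0x"
  · simp only [Bool.not_false, if_true]
  · simp only [Bool.not_true, Bool.false_eq_true, if_false]
    have hslice : (PySem.Str.slice address (some 2) none).toList = address.toList.drop 2 := by
      simp [PySem.Str.slice]
      rw [show (2 : Int) = ((2 : Nat) : Int) from rfl, PySem.List.slice_from_natCast]
    have hlen : PySem.Str.len (PySem.Str.slice address (some 2) none)
        = (address.toList.drop 2).length := by
      rw [PySem.Str.len_eq, hslice]
    rw [consume_eq, hlen, hslice]
    have hallc : ((address.toList.drop 2).all fun ch => pvHexAlphabet.contains ch)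
        = (address.toList.drop 2).all pvIsHexDigit := by
      rw [show (fun ch => pvHexAlphabet.contains ch) = pvIsHexDigit from funext hex_char_eq]
    rw [hallc]
    cases hb : (address.toList.drop 2).all pvIsHexDigit <;>
      split_ifs with h0 h2 <;>
      rw [Bool.eq_iff_iff] <;> (try simp_all) <;> try omega
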